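-- pv_equiv track=rewrite | github.com/BitR1ft/UniVex | backend/app/agent/tools/cloud/azure_tools.py | _extract_resource_group
-- ===== SOURCE A (Python) =====
-- def _extract_resource_group(resource_id: str) -> str:
--     parts = resource_id.split("/")
--     parts_lower = [p.lower() for p in parts]
--     try:
--         idx = parts_lower.index("resourcegroups")
--         return parts[idx + 1]
--     except (ValueError, IndexError):
--         return "unknown"
-- ===== SOURCE B (Python) =====
-- def _extract_resource_group(resource_id: str) -> str:
--     # single character-level pass with an accumulator; never builds the list of segments
--     seg = []            # characters of the current segment
--     want_next = False   # the previous segment was 'resourcegroups' (case-insensitive)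
--     for ch in resource_id:
--         if ch == '/':
--             if want_next:
--                 return ''.join(seg)
--             want_next = ''.join(seg).lower() == 'resourcegroups'
--             seg = []
--         else:
--             seg.append(ch)
--     if want_next:
--         return ''.join(seg)
--     return 'unknown'
-- ===== Notes on version B (the rewrite author's own statement) =====
-- stated objective: alternative
-- what changed: Replaces split-into-parts + lowered copy + .index() + exception handling by a single character-level state machine over the raw string (accumulator for the current segment, a flag for 'previous segment matched'), which never materializes the list of segments.
import Mathlib
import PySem

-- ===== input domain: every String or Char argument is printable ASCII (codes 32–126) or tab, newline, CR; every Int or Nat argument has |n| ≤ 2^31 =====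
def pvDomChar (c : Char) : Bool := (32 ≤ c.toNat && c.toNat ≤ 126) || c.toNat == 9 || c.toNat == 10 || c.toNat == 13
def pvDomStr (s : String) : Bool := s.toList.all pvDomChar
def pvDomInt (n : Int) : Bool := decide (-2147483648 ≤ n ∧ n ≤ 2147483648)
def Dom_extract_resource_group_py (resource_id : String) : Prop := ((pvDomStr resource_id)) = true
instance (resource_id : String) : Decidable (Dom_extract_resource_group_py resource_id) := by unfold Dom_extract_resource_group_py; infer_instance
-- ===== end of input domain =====

-- B replaces A's split-into-parts + lowered copy + .index() + exception handling by a
-- single character-level pass over the raw string with an accumulator (same O(n) cost).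


-- ===== PORT A =====
def extract_resource_group_py (resource_id : String) : String :=
  let parts := (PySem.Str.split? resource_id "/").getD []   -- split? is some: sep "/" ≠ ""
  let parts_lower := parts.map PySem.Str.lower
  match PySem.List.index? parts_lower "resourcegroups" with
  | some idx =>
      match PySem.List.pyGet? parts ((idx : Int) + 1) with
      | some v => v
      | none => "unknown"          -- IndexError branch
  | none => "unknown"              -- ValueError branch

-- ===== PORT B =====
-- Source B's for-loop over the characters; seg is kept reversed (list append = cons here)
def pvScanGo : List Char → List Char → Bool → String
  | [], seg, want => if want then String.ofList seg.reverse else "unknown"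
  | c :: r, seg, want =>
      if c = '/' then
        if want then String.ofList seg.reverse
        else pvScanGo r [] (PySem.Chars.lower seg.reverse == "resourcegroups".toList)
      else pvScanGo r (c :: seg) want

def extract_resource_group_py_alt (resource_id : String) : String :=
  pvScanGo resource_id.toList [] false

-- ===== PRECONDITION & SPEC =====
def Spec_extract_resource_group_py (resource_id : String) (out : String) : Prop := out = extract_resource_group_py_alt resource_id
instance (resource_id : String) (out : String) : Decidable (Spec_extract_resource_group_py resource_id out) := by unfold Spec_extract_resource_group_py; infer_instance

-- ===== CLAIM (what is proved, stated in full; the proofs are below) =====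
def Claim_equal_extract_resource_group_py : Prop := ∀ (resource_id : String), Dom_extract_resource_group_py resource_id → Spec_extract_resource_group_py resource_id (extract_resource_group_py resource_id)

-- ===== LEMMAS AND PROOFS =====

-- structural split on '/', with its head (first segment) and tail exposed
def pvSplit : List Char → List (List Char)
  | [] => [[]]
  | c :: r =>
      if c = '/' then [] :: pvSplit r
      else match pvSplit r with
           | s :: t => (c :: s) :: t
           | [] => [[c]]   -- unreachable: pvSplit is never []

def pvFirst : List Char → List Char
  | [] => []
  | c :: r => if c = '/' then [] else c :: pvFirst r

def pvRest : List Char → List (List Char)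
  | [] => []
  | c :: r => if c = '/' then pvSplit r else pvRest r

theorem pvSplit_eq (cs : List Char) : pvSplit cs = pvFirst cs :: pvRest cs := by
  induction cs with
  | nil => rfl
  | cons c r ih =>
    by_cases h : c = '/'
    · simp [pvSplit, pvFirst, pvRest, h]
    · simp [pvSplit, pvFirst, pvRest, h, ih]

-- the fuel-based splitOn.go of PySem, characterised for the one-char separator '/'
theorem pvSplitOn_go_eq (fuel : Nat) :
    ∀ (l cur : List Char) (acc : List (List Char)), l.length ≤ fuel →
      PySem.Chars.splitOn.go ['/'] fuel l cur acc
        = acc.reverse ++ ((cur.reverse ++ pvFirst l) :: pvRest l) := by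
  induction fuel with
  | zero =>
    intro l cur acc h
    have : l = [] := List.eq_nil_of_length_eq_zero (Nat.le_zero.mp h)
    subst this
    simp [PySem.Chars.splitOn.go, pvFirst, pvRest]
  | succ fuel ih =>
    intro l cur acc h
    cases l with
    | nil => simp [PySem.Chars.splitOn.go, pvFirst, pvRest]
    | cons c rest =>
      simp only [List.length_cons] at h
      by_cases hc : c = '/'
      · subst hc
        rw [PySem.Chars.splitOn.go]
        rw [if_pos (by simp)]
        rw [show List.drop ['/'].length ('/' :: rest) = rest from rfl]
        rw [ih rest [] (cur.reverse :: acc) (Nat.le_of_succ_le_succ h)]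
        simp [pvFirst, pvRest, pvSplit_eq]
      · rw [PySem.Chars.splitOn.go]
        rw [if_neg (by simp; exact fun hh => hc hh.symm)]
        rw [ih rest (c :: cur) acc (Nat.le_of_succ_le_succ h)]
        simp [pvFirst, pvRest, hc]

theorem pvSplitOn_slash (cs : List Char) :
    PySem.Chars.splitOn cs ['/'] = pvSplit cs := by
  rw [PySem.Chars.splitOn,
      pvSplitOn_go_eq (cs.length + 1) cs [] [] (Nat.le_succ _), pvSplit_eq]
  rfl

-- A's body, over char-lists
def pvABodyL (parts : List (List Char)) : String :=
  match PySem.List.index? (parts.map PySem.Chars.lower) "resourcegroups".toList with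
  | some idx =>
      match PySem.List.pyGet? parts ((idx : Int) + 1) with
      | some v => String.ofList v
      | none => "unknown"
  | none => "unknown"

-- adjacent-pair scan over char-lists (proof intermediary between the two ports)
def pvPairs : List (List Char) → String
  | p :: q :: rest =>
      if PySem.Chars.lower p = "resourcegroups".toList then String.ofList q
      else pvPairs (q :: rest)
  | _ => "unknown"

theorem pvABodyL_eq_pairs (parts : List (List Char)) : pvABodyL parts = pvPairs parts := by
  induction parts with
  | nil => rfl
  | cons p tl ih =>
    cases tl with
    | nil =>
      by_cases h : PySem.Chars.lower p = "resourcegroups".toList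
      · rw [pvABodyL, List.map_cons, h, List.map_nil, PySem.List.index?_cons_self]
        show (match PySem.List.pyGet? [p] (((0 : Nat) : Int) + 1) with
              | some v => String.ofList v | none => "unknown") = pvPairs [p]
        rw [PySem.List.pyGet?_cons_succ]
        simp [PySem.List.pyGet?, PySem.List.pyIdx?, pvPairs]
      · rw [pvABodyL, List.map_cons, List.map_nil,
            PySem.List.index?_cons_of_ne ([] : List (List Char)) h]
        rfl
    | cons q rest =>
      by_cases h : PySem.Chars.lower p = "resourcegroups".toList
      · rw [pvABodyL, List.map_cons, h, PySem.List.index?_cons_self]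
        show (match PySem.List.pyGet? (p :: q :: rest) (((0 : Nat) : Int) + 1) with
              | some v => String.ofList v | none => "unknown") = pvPairs (p :: q :: rest)
        rw [PySem.List.pyGet?_cons_succ]
        simp [pvPairs, h]
      · rw [pvABodyL, List.map_cons,
            PySem.List.index?_cons_of_ne ((q :: rest).map PySem.Chars.lower) h]
        rw [pvPairs]
        simp only [h, if_false]
        rw [← ih, pvABodyL]
        cases hidx : PySem.List.index? ((q :: rest).map PySem.Chars.lower) "resourcegroups".toList with
        | none => simp
        | some i =>
          simp only [Option.map_some]
          rw [PySem.List.pyGet?_cons_succ]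
          push_cast
          rfl

-- the scanner with want = true returns the first segment appended to seg
theorem pvScanGo_true (cs : List Char) :
    ∀ seg, pvScanGo cs seg true = String.ofList (seg.reverse ++ pvFirst cs) := by
  induction cs with
  | nil => intro seg; simp [pvScanGo, pvFirst]
  | cons c r ih =>
    intro seg
    by_cases h : c = '/'
    · simp [pvScanGo, pvFirst, h]
    · rw [pvScanGo, if_neg h, ih (c :: seg)]
      simp [pvFirst, h]

-- the main invariant: scanner with want = false = pair scan over the segments
theorem pvScanGo_false (cs : List Char) :
    ∀ seg, pvScanGo cs seg false = pvPairs ((seg.reverse ++ pvFirst cs) :: pvRest cs) := by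
  induction cs with
  | nil =>
    intro seg
    simp [pvScanGo, pvFirst, pvRest, pvPairs]
  | cons c r ih =>
    intro seg
    by_cases h : c = '/'
    · subst h
      rw [pvScanGo, if_pos rfl]
      rw [show pvFirst ('/' :: r) = [] from by simp [pvFirst]]
      rw [show pvRest ('/' :: r) = pvFirst r :: pvRest r from by
        simp [pvRest, pvSplit_eq]]
      rw [List.append_nil]
      simp only [Bool.false_eq_true, if_false]
      by_cases hm : PySem.Chars.lower seg.reverse = "resourcegroups".toList
      · rw [show (PySem.Chars.lower seg.reverse == "resourcegroups".toList) = true from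
            beq_iff_eq.mpr hm]
        rw [pvScanGo_true r [], pvPairs, if_pos hm]
        simp
      · rw [show (PySem.Chars.lower seg.reverse == "resourcegroups".toList) = false from
            beq_eq_false_iff_ne.mpr hm]
        rw [ih [], pvPairs, if_neg hm]
        simp
    · rw [pvScanGo, if_neg h, ih (c :: seg)]
      simp [pvFirst, pvRest, h]

-- bridging A's String-level body to the char-list body
theorem pvIndex?_map_ofList (l : List (List Char)) :
    PySem.List.index? ((l.map String.ofList).map PySem.Str.lower) "resourcegroups"
      = PySem.List.index? (l.map PySem.Chars.lower) "resourcegroups".toList := by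
  induction l with
  | nil => rfl
  | cons p tl ih =>
    by_cases h : PySem.Chars.lower p = "resourcegroups".toList
    · have h1 : PySem.Str.lower (String.ofList p) = "resourcegroups" := by
        apply String.toList_inj.mp
        rw [PySem.Str.toList_lower, String.toList_ofList, h]
      rw [List.map_cons, List.map_cons, h1, PySem.List.index?_cons_self,
          List.map_cons, h, PySem.List.index?_cons_self]
    · have h1 : PySem.Str.lower (String.ofList p) ≠ "resourcegroups" := by
        intro hh
        apply h
        have := PySem.Str.toList_lower (String.ofList p)
        simp only [String.toList_ofList, hh] at this
        exact this.symm
      rw [List.map_cons, List.map_cons, PySem.List.index?_cons_of_ne _ h1,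
          List.map_cons, PySem.List.index?_cons_of_ne _ h, ih]

theorem pvA_eq_bodyL (resource_id : String) :
    extract_resource_group_py resource_id = pvABodyL (pvSplit resource_id.toList) := by
  rw [extract_resource_group_py]
  have hsplit : (PySem.Str.split? resource_id "/").getD []
      = (pvSplit resource_id.toList).map String.ofList := by
    rw [PySem.Str.split?, PySem.Chars.split?]
    simp [pvSplitOn_slash]
  simp only [hsplit, pvABodyL]
  rw [pvIndex?_map_ofList]
  cases hidx : PySem.List.index? ((pvSplit resource_id.toList).map PySem.Chars.lower)
      "resourcegroups".toList with
  | none => rfl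
  | some i =>
    simp only []
    have hget : PySem.List.pyGet? ((pvSplit resource_id.toList).map String.ofList) ((i : Int) + 1)
        = (PySem.List.pyGet? (pvSplit resource_id.toList) ((i : Int) + 1)).map String.ofList := by
      simp [PySem.List.pyGet?, PySem.List.pyIdx?]
    rw [hget]
    cases PySem.List.pyGet? (pvSplit resource_id.toList) ((i : Int) + 1) with
    | none => rfl
    | some v => rfl

-- ===== VERDICT (by name: the statement is the Claim_ definition above) =====
theorem extract_resource_group_py_spec : Claim_equal_extract_resource_group_py := by
  intro rid _
  show extract_resource_group_py rid = extract_resource_group_py_alt rid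
  rw [pvA_eq_bodyL, pvABodyL_eq_pairs, extract_resource_group_py_alt,
      pvScanGo_false rid.toList [], pvSplit_eq]
  simp
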